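-- pv_equiv track=rewrite | github.com/S8-StudyGroup/Navigate-Basic-Algorithms | NBA_heeje/2022_09/week_3rd/17681.py | solution
-- ===== SOURCE A (Python) =====
-- def solution(n, arr1, arr2):
--     answer = []
--
--     for i in range(n):
--         combine_row = arr1[i] | arr2[i]     # 비트 연산(or)
--         decoding_row = ""                   # 해독된 행 암호
--
--         for j in range(n - 1, -1, -1):      # 왼쪽부터 비교하기 위해 역순 탐색
--             if combine_row & (1 << j):      # 해당 자릿수가 1이라면(벽)
--                 decoding_row += "#"         # 벽('#') 삽입
--             else:                           # 해당 자릿수가 0이라면(공백)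
--                 decoding_row += " "         # 공백(' ') 삽입
--
--         answer.append(decoding_row)
--     return answer
-- ===== SOURCE B (Python) =====
-- def solution(n, arr1, arr2):
--     # Decode each row at once: OR the rows, mask to n bits, render as a
--     # zero-padded binary string and translate '1'/'0' to '#'/' '.
--     table = str.maketrans("10", "# ")
--     return [format((arr1[i] | arr2[i]) & ((1 << n) - 1), "b").zfill(n).translate(table)
--             for i in range(n)]
-- ===== Notes on version B (the rewrite author's own statement) =====
-- stated objective: idiomatic
-- what changed: B replaces A's per-bit-position inner loop (shift, mask, test, append one char per bit) by rendering each OR'd row at once: mask to n bits, format as a zero-padded binary string, and translate '1'/'0' to '#'/' ' via str.translate.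
import Mathlib
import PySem

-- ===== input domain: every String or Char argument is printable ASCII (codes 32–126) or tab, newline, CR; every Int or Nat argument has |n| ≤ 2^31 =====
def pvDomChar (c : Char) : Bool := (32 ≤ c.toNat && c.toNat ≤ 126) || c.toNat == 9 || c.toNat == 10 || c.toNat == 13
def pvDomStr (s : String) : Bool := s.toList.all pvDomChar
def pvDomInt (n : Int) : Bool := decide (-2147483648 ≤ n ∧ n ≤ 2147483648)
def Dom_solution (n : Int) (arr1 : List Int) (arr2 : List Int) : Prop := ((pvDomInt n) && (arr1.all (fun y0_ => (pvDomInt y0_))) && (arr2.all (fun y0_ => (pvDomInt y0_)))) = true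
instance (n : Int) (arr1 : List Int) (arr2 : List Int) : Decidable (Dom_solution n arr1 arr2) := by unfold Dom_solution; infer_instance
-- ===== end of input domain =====

-- B renders each row at once (mask to n bits, zero-padded binary string, translate
-- '1'/'0' to '#'/' ') instead of A's per-bit-position test-and-append scan; objective: idiomatic.

-- ===== PORT A =====
-- Literal port of A.  arr1[i]/arr2[i] is pyGetD … 0: Pre_solution guarantees 0 ≤ i < len,
-- so the default is never read (Python raises IndexError exactly outside Pre_solution).
-- The Python row string is accumulated as List Char and packed with String.ofList when appended.
-- j ∈ range(n-1, -1, -1) is always ≥ 0, so the shift amount j.toNat is exact.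
def solution (n : Int) (arr1 : List Int) (arr2 : List Int) : List String :=
  (PySem.List.pyRange 0 n 1).foldl (fun answer i =>
    let combine_row : Int :=
      PySem.Int.bor (PySem.List.pyGetD arr1 i 0) (PySem.List.pyGetD arr2 i 0)
    let decoding_row : List Char :=
      (PySem.List.pyRange (n - 1) (-1) (-1)).foldl (fun s j =>
        if PySem.Int.band combine_row ((1 : Int) <<< (j.toNat : Int)) ≠ 0 then s ++ ['#'] else s ++ [' ']) []
    answer ++ [String.ofList decoding_row]) []

-- ===== PORT B =====
-- str.translate with {'1'→'#', '0'→' '}, ported by hand (exact: identity on all other chars).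
def pyTranslate (cs : List Char) : List Char :=
  cs.map (fun c => if c = '1' then '#' else if c = '0' then ' ' else c)

-- format(x, "b") is PySem.Int.toBinChars, .zfill(n) is PySem.Chars.zfill.
-- n.toNat is exact: '1 << n' is only evaluated for i ∈ range(n), i.e. when 0 < n.
def solution_alt (n : Int) (arr1 : List Int) (arr2 : List Int) : List String :=
  (PySem.List.pyRange 0 n 1).map (fun i =>
    String.ofList (pyTranslate (PySem.Chars.zfill
      (PySem.Int.toBinChars
        (PySem.Int.band
          (PySem.Int.bor (PySem.List.pyGetD arr1 i 0) (PySem.List.pyGetD arr2 i 0))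
          (((1 : Int) <<< (n.toNat : Int)) - 1)))
      n)))

-- ===== PRECONDITION & SPEC =====
-- A (and B alike) raises IndexError iff some i ∈ range(n) is out of range of arr1 or arr2;
-- Pre_ excludes exactly those inputs (for n ≤ 0 no index is read and A returns []).
def Pre_solution (n : Int) (arr1 : List Int) (arr2 : List Int) : Prop :=
  n ≤ (arr1.length : Int) ∧ n ≤ (arr2.length : Int)
instance (n : Int) (arr1 : List Int) (arr2 : List Int) : Decidable (Pre_solution n arr1 arr2) := by unfold Pre_solution; infer_instance
def pvWitness_solution : Int × List Int × List Int := (2, [2, 1], [1, 3])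

def Spec_solution (n : Int) (arr1 : List Int) (arr2 : List Int) (out : List String) : Prop := out = solution_alt n arr1 arr2
instance (n : Int) (arr1 : List Int) (arr2 : List Int) (out : List String) : Decidable (Spec_solution n arr1 arr2 out) := by unfold Spec_solution; infer_instance

-- ===== CLAIM (what is proved, stated in full; the proofs are below) =====
def Claim_equal_solution : Prop := ∀ (n : Int) (arr1 : List Int) (arr2 : List Int), Dom_solution n arr1 arr2 → Pre_solution n arr1 arr2 → Spec_solution n arr1 arr2 (solution n arr1 arr2)

-- ===== LEMMAS AND PROOFS =====

-- canonical w-char row of a w-bit value: MSB first, LSB appended last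
def canonRow : Nat → Nat → List Char
  | 0, _ => []
  | w + 1, m => canonRow w (m / 2) ++ [if m % 2 = 1 then '#' else ' ']

theorem one_shiftLeft_int (w : Nat) : ((1 : Int) <<< (w : Int)) = ((2 ^ w : Nat) : Int) :=
  Int.one_shiftLeft w

theorem mask_cast (w : Nat) : ((1 : Int) <<< (w : Int)) - 1 = ((2 ^ w - 1 : Nat) : Int) := by
  have hp : 0 < 2 ^ w := Nat.two_pow_pos w
  rw [one_shiftLeft_int]; omega

-- bitwise complement within w bits, as the subtraction Python's '&' produces on negatives
theorem compl_testBit (w : Nat) : ∀ s j : Nat, s < 2 ^ w → j < w →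
    ((2 ^ w - 1) - s).testBit j = ! s.testBit j := by
  induction w with
  | zero => omega
  | succ w ih =>
    intro s j hs hj
    have hpow : 0 < 2 ^ w := Nat.two_pow_pos w
    have hs2 : s / 2 < 2 ^ w := by rw [pow_succ] at hs; omega
    have hval : (2 ^ (w + 1) - 1) - s = 2 * ((2 ^ w - 1) - s / 2) + (1 - s % 2) := by
      rw [pow_succ] at hs ⊢; omega
    cases j with
    | zero =>
      simp only [Nat.testBit_zero, hval]
      have : s % 2 = 0 ∨ s % 2 = 1 := by omega
      rcases this with h | h <;> simp [h]
    | succ j =>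
      rw [Nat.testBit_add_one, Nat.testBit_add_one, hval]
      have : (2 * ((2 ^ w - 1) - s / 2) + (1 - s % 2)) / 2 = (2 ^ w - 1) - s / 2 := by omega
      rw [this]
      exact ih (s / 2) j hs2 (by omega)

-- Python's 'v & ((1 << w) - 1)' in closed Nat form, for either sign of v
theorem band_mask_eq (v : Int) (w : Nat) :
    PySem.Int.band v (((1 : Int) <<< (w : Int)) - 1)
      = (((if 0 ≤ v then v.toNat % 2 ^ w else (2 ^ w - 1) - ((-v - 1).toNat % 2 ^ w)) : Nat) : Int) := by
  rw [mask_cast, PySem.Int.band]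
  have hb : (0 : Int) ≤ ((2 ^ w - 1 : Nat) : Int) := by positivity
  split
  · rename_i hv
    rw [Int.toNat_natCast, Nat.and_two_pow_sub_one_eq_mod]
  · rename_i hv
    rw [Int.toNat_natCast, Nat.land_comm, Nat.and_two_pow_sub_one_eq_mod]

-- the masked value is a nonnegative w-bit value
theorem mask_band_bounds (v : Int) (w : Nat) :
    0 ≤ PySem.Int.band v (((1 : Int) <<< (w : Int)) - 1) ∧
      (PySem.Int.band v (((1 : Int) <<< (w : Int)) - 1)).toNat < 2 ^ w := by
  rw [band_mask_eq]
  have hpow : 0 < 2 ^ w := Nat.two_pow_pos w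
  have h1 : v.toNat % 2 ^ w < 2 ^ w := Nat.mod_lt _ hpow
  constructor
  · positivity
  · rw [Int.toNat_natCast]; split <;> omega

-- Python's test 'v & (1 << j)' reads bit j of the w-bit masked value, for j < w
theorem bit_bridge (v : Int) (w j : Nat) (hj : j < w) :
    (PySem.Int.band v ((1 : Int) <<< (j : Int)) ≠ 0) ↔
      (PySem.Int.band v (((1 : Int) <<< (w : Int)) - 1)).toNat.testBit j = true := by
  have hpowj : (1 : Int) <<< (j : Int) = ((2 ^ j : Nat) : Int) := one_shiftLeft_int j
  have hpow : 0 < 2 ^ w := Nat.two_pow_pos w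
  rw [band_mask_eq, hpowj, PySem.Int.band, Int.toNat_natCast]
  have hbj : (0 : Int) ≤ ((2 ^ j : Nat) : Int) := by positivity
  split
  · rename_i hv
    simp only [Int.toNat_natCast]
    rw [Nat.and_two_pow, Nat.testBit_mod_two_pow]
    cases h : v.toNat.testBit j <;> simp [h, hj]
  · rename_i hv
    simp only [Int.toNat_natCast]
    rw [Nat.land_comm, Nat.and_two_pow]
    have hmod : (-v - 1).toNat % 2 ^ w < 2 ^ w := Nat.mod_lt _ hpow
    rw [compl_testBit w _ j hmod hj, Nat.testBit_mod_two_pow]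
    cases h : (-v - 1).toNat.testBit j <;> simp [h, hj]

-- A's MSB-first bit scan produces the canonical row
theorem canon_eq_map (w : Nat) : ∀ m : Nat,
    (List.range w).map (fun k => if m.testBit (w - 1 - k) then '#' else ' ') = canonRow w m := by
  induction w with
  | zero => intro m; rfl
  | succ w ih =>
    intro m
    rw [List.range_succ, List.map_append, canonRow]
    congr 1
    · rw [← ih (m / 2)]
      apply List.map_congr_left
      intro k hk
      have hk' : k < w := List.mem_range.mp hk
      have h1 : w + 1 - 1 - k = (w - 1 - k) + 1 := by omega
      rw [h1, Nat.testBit_add_one]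
    · simp only [List.map_cons, List.map_nil]
      have h0 : w + 1 - 1 - w = 0 := by omega
      rw [h0, Nat.testBit_zero]
      congr 1
      rcases Nat.mod_two_eq_zero_or_one m with h | h <;> simp [h]

-- A's inner loop shape: conditional push of one char
theorem foldl_if_push {α : Type} (p : α → Prop) [DecidablePred p] (a b : Char) :
    ∀ (l : List α) (acc : List Char),
    l.foldl (fun s j => if p j then s ++ [a] else s ++ [b]) acc
      = acc ++ l.map (fun j => if p j then a else b) := by
  intro l
  induction l with
  | nil => simp
  | cons x xs ih => intro acc; simp only [List.foldl_cons, List.map_cons, ih]; split <;> simp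

theorem canonRow_zero_left (w : Nat) : canonRow w 0 = List.replicate w ' ' := by
  induction w with
  | zero => rfl
  | succ w ih => rw [List.replicate_succ']; simp [canonRow, ih]

theorem toDigits_two_mem : ∀ m : Nat, ∀ c ∈ Nat.toDigits 2 m, c = '0' ∨ c = '1' := by
  intro m
  induction m using Nat.strong_induction_on with
  | _ m ih =>
    rw [Nat.toDigits_eq_if (by norm_num)]
    split
    · rename_i h
      intro c hc
      interval_cases m <;> simp_all [Nat.digitChar]
    · rename_i h
      intro c hc
      rcases List.mem_append.mp hc with h1 | h1
      · exact ih (m / 2) (by omega) c h1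
      · have h2 : m % 2 = 0 ∨ m % 2 = 1 := by omega
        simp only [List.mem_singleton] at h1
        rcases h2 with h2 | h2 <;> simp [h1, h2, Nat.digitChar]

theorem toDigits_two_ne_nil (m : Nat) : Nat.toDigits 2 m ≠ [] := by
  rw [Nat.toDigits_eq_if (by norm_num)]
  split <;> simp

-- zfill on a pure digit string is a left pad with '0'
theorem zfill_digits (cs : List Char) (w : Int) (hne : cs ≠ [])
    (hd : ∀ c ∈ cs, c = '0' ∨ c = '1') :
    PySem.Chars.zfill cs w = List.replicate (w.toNat - cs.length) '0' ++ cs := by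
  rcases cs with _ | ⟨c, rest⟩
  · simp at hne
  · have hc := hd c (by simp)
    rw [PySem.Chars.zfill]
    split
    · rename_i h
      have : w.toNat - (c :: rest).length = 0 := by simp at h ⊢; omega
      rw [this]; simp
    · split
      · rename_i h2; rcases hc with hc | hc <;> simp [hc] at h2
      · rfl

theorem pyTranslate_digit (r : Nat) (hr : r < 2) :
    pyTranslate [r.digitChar] = [if r % 2 = 1 then '#' else ' '] := by
  interval_cases r <;> simp [pyTranslate, Nat.digitChar]

-- B's formatted-and-translated row is the canonical row
theorem zfill_toDigits_canon : ∀ w : Nat, 0 < w → ∀ m : Nat, m < 2 ^ w →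
    pyTranslate (PySem.Chars.zfill (Nat.toDigits 2 m) (w : Int)) = canonRow w m := by
  intro w hw0
  have hw1 : 1 ≤ w := hw0
  clear hw0
  induction w, hw1 using Nat.le_induction with
  | base =>
    intro m hm
    have hm2 : m < 2 := by simpa using hm
    rw [Nat.toDigits_of_lt_base hm2,
        zfill_digits _ _ (by simp) (by intro c hc; exact toDigits_two_mem m c (by rw [Nat.toDigits_of_lt_base hm2]; exact hc))]
    simp only [List.length_singleton, Nat.sub_self, List.replicate_zero, List.nil_append]
    rw [canonRow, canonRow]
    have : m / 2 = 0 := by omega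
    simp [this, pyTranslate_digit m hm2, Nat.mod_eq_of_lt hm2]
  | succ w hw ih =>
    intro m hm
    have hpow : 0 < 2 ^ w := Nat.two_pow_pos w
    have hhalf : m / 2 < 2 ^ w := by rw [pow_succ] at hm; omega
    have hdig := toDigits_two_mem m
    have hlenh : (Nat.toDigits 2 (m / 2)).length ≤ w := Nat.toDigits_length 2 (m / 2) w hw hhalf
    by_cases hm2 : m < 2
    · -- single digit, padded with w zeros
      rw [Nat.toDigits_of_lt_base hm2] at hdig ⊢
      rw [zfill_digits _ _ (by simp) hdig]
      have hlen : ((w + 1 : Nat) : Int).toNat - ([Nat.digitChar m]).length = w := by simp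
      rw [hlen, canonRow]
      have hm0 : m / 2 = 0 := by omega
      rw [hm0, canonRow_zero_left]
      unfold pyTranslate
      rw [List.map_append, List.map_replicate]
      have : ((if ('0':Char) = '1' then '#' else if ('0':Char) = '0' then ' ' else '0')) = ' ' := by decide
      rw [this]
      congr 1
      have := pyTranslate_digit m hm2
      unfold pyTranslate at this
      rw [this, Nat.mod_eq_of_lt hm2]
    · -- m ≥ 2: toDigits m = toDigits (m/2) ++ [digitChar (m%2)]
      have hrec : Nat.toDigits 2 m = Nat.toDigits 2 (m / 2) ++ [(m % 2).digitChar] := by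
        rw [Nat.toDigits_eq_if (by norm_num), if_neg (by omega)]
      rw [hrec]
      have hdig' : ∀ c ∈ Nat.toDigits 2 (m / 2) ++ [(m % 2).digitChar], c = '0' ∨ c = '1' := by
        rw [← hrec]; exact hdig
      rw [zfill_digits _ _ (by simp) hdig']
      have hlapp : (Nat.toDigits 2 (m / 2) ++ [(m % 2).digitChar]).length
          = (Nat.toDigits 2 (m / 2)).length + 1 := by simp
      have hlen : ((w + 1 : Nat) : Int).toNat - (Nat.toDigits 2 (m / 2) ++ [(m % 2).digitChar]).length
          = ((w : Nat) : Int).toNat - (Nat.toDigits 2 (m / 2)).length := by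
        rw [hlapp]; omega
      rw [hlen, canonRow, ← List.append_assoc]
      unfold pyTranslate
      rw [List.map_append]
      congr 1
      · have := ih (m / 2) hhalf
        rw [zfill_digits _ _ (toDigits_two_ne_nil _) (fun c hc => toDigits_two_mem _ c hc)] at this
        unfold pyTranslate at this
        rw [this]
      · have h2 : m % 2 < 2 := Nat.mod_lt m (by norm_num)
        have := pyTranslate_digit (m % 2) h2
        unfold pyTranslate at this
        have h22 : m % 2 % 2 = m % 2 := by omega
        rw [this, h22]

-- one row of A equals one row of B, for 0 ≤ i < n
theorem row_eq (n : Int) (v : Int) (hn : 0 < n) :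
    (PySem.List.pyRange (n - 1) (-1) (-1)).foldl (fun s j =>
        if PySem.Int.band v ((1 : Int) <<< (j.toNat : Int)) ≠ 0 then s ++ ['#'] else s ++ [' ']) []
      = pyTranslate (PySem.Chars.zfill
          (PySem.Int.toBinChars (PySem.Int.band v (((1 : Int) <<< (n.toNat : Int)) - 1))) n) := by
  obtain ⟨hge, hlt⟩ := mask_band_bounds v n.toNat
  -- A side
  rw [foldl_if_push, List.nil_append, PySem.List.pyRange_neg_one]
  have hspan : (n - 1 - (-1)).toNat = n.toNat := by omega
  rw [hspan, List.map_map]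
  have hA : (List.range n.toNat).map ((fun j : Int =>
        if PySem.Int.band v ((1 : Int) <<< (j.toNat : Int)) ≠ 0 then '#' else ' ') ∘ fun k : Nat => n - 1 - (k : Int))
      = canonRow n.toNat (PySem.Int.band v (((1 : Int) <<< (n.toNat : Int)) - 1)).toNat := by
    rw [← canon_eq_map]
    apply List.map_congr_left
    intro k hk
    have hk' : k < n.toNat := List.mem_range.mp hk
    have hjt : (n - 1 - (k : Int)).toNat = n.toNat - 1 - k := by omega
    simp only [Function.comp_apply, hjt]
    exact if_congr (bit_bridge v n.toNat (n.toNat - 1 - k) (by omega)) rfl rfl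
  rw [hA]
  -- B side
  have hbin : PySem.Int.toBinChars (PySem.Int.band v (((1 : Int) <<< (n.toNat : Int)) - 1))
      = Nat.toDigits 2 (PySem.Int.band v (((1 : Int) <<< (n.toNat : Int)) - 1)).toNat := by
    rw [PySem.Int.toBinChars, if_neg (by omega)]
  have hnw : ((n.toNat : Nat) : Int) = n := by omega
  rw [hbin]
  generalize hMM : (PySem.Int.band v (((1 : Int) <<< (n.toNat : Int)) - 1)).toNat = M at hlt ⊢
  have hz := zfill_toDigits_canon n.toNat (by omega) M hlt
  rw [hnw] at hz
  exact hz.symm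

-- ===== VERDICT (by name: the statement is the Claim_ definition above) =====
theorem solution_spec : Claim_equal_solution := by
  intro n arr1 arr2 _ _
  unfold Spec_solution solution solution_alt
  simp only [PySem.List.foldl_append_singleton_eq_map, List.nil_append]
  apply List.map_congr_left
  intro i hi
  have hin := (PySem.List.mem_pyRange_one).mp hi
  congr 1
  exact row_eq n _ (by omega)
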